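-- pv_equiv track=rewrite | github.com/PStahl/project_euler | p048_self_powers.py | self_powers
-- ===== SOURCE A (Python) =====
-- def self_powers(last):
--     TEN = 10000000000
--
--     series = 0
--
--     for n in range(1, last + 1):
--         p = 1
--         for i in range(n):
--             p *= n
--             p %= TEN
--
--
--         series += p
--         series %= TEN
--
--     return str(series)
-- ===== SOURCE B (Python) =====
-- def self_powers(last):
--     TEN = 10000000000
--
--     series = 0
--
--     for n in range(1, last + 1):
--         # n^n mod TEN by square-and-multiply instead of n repeated multiplications
--         result = 1
--         base = n % TEN
--         e = n
--         while e > 0: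
--             if e % 2 == 1:
--                 result = result * base % TEN
--             base = base * base % TEN
--             e //= 2
--
--         series = (series + result) % TEN
--
--     return str(series)
-- ===== Notes on version B (the rewrite author's own statement) =====
-- stated objective: faster
-- what changed: The inner term n^n mod 1e10 is computed by an O(log n) square-and-multiply loop instead of A's n repeated multiplications.
import Mathlib
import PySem

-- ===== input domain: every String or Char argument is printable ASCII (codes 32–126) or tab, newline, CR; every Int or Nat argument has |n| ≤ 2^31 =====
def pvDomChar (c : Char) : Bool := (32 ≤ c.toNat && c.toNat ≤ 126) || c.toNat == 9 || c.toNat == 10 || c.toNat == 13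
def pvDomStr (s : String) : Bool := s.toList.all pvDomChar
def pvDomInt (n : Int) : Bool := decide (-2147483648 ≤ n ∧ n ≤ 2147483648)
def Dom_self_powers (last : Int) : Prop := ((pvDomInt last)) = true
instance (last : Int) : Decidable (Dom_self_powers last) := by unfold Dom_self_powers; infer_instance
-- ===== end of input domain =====

-- B computes each term n^n mod 1e10 by square-and-multiply (O(log n)) instead of A's n repeated multiplications: asymptotically faster.

-- ===== PORT A =====
def self_powers (last : Int) : String :=
  let series : Int :=
    (PySem.List.pyRange 1 (last + 1) 1).foldl
      (fun series n =>
        let p : Int :=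
          (PySem.List.pyRange 0 n 1).foldl
            (fun p _ => PySem.Int.mod (p * n) 10000000000) 1
        PySem.Int.mod (series + p) 10000000000) 0
  PySem.Int.toStr series

-- ===== PORT B =====
-- the 'while e > 0' loop of Source B
def pvPowmodLoop (result base e : Int) : Int :=
  if 0 < e then
    pvPowmodLoop
      (if PySem.Int.mod e 2 = 1 then PySem.Int.mod (result * base) 10000000000 else result)
      (PySem.Int.mod (base * base) 10000000000)
      (PySem.Int.floordiv e 2)
  else result
termination_by e.toNat
decreasing_by
  rw [PySem.Int.floordiv_eq_ediv_of_pos (by norm_num)]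
  omega

def self_powers_alt (last : Int) : String :=
  let series : Int :=
    (PySem.List.pyRange 1 (last + 1) 1).foldl
      (fun series n =>
        PySem.Int.mod (series + pvPowmodLoop 1 (PySem.Int.mod n 10000000000) n) 10000000000) 0
  PySem.Int.toStr series

-- ===== PRECONDITION & SPEC =====
def Spec_self_powers (last : Int) (out : String) : Prop := out = self_powers_alt last
instance (last : Int) (out : String) : Decidable (Spec_self_powers last out) := by unfold Spec_self_powers; infer_instance

-- ===== CLAIM (what is proved, stated in full; the proofs are below) =====
def Claim_equal_self_powers : Prop := ∀ (last : Int), Dom_self_powers last → Spec_self_powers last (self_powers last)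

-- ===== LEMMAS AND PROOFS =====

-- A's inner loop computes n^k mod 1e10 after k iterations
theorem pvLoopA_eq (k : Nat) (n : Int) :
    (PySem.List.pyRange 0 (k : Int) 1).foldl
      (fun p _ => PySem.Int.mod (p * n) 10000000000) 1 = n ^ k % 10000000000 := by
  induction k with
  | zero => simp [PySem.List.pyRange_one_eq_nil]
  | succ k ih =>
    rw [show ((k + 1 : Nat) : Int) = (k : Int) + 1 by push_cast; ring,
      PySem.List.pyRange_one_succ_right (by positivity), List.foldl_append]
    simp only [List.foldl, ih]
    rw [PySem.Int.mod_eq_emod_of_pos (by norm_num), pow_succ, Int.mul_emod, Int.emod_emod_of_dvd _ (by norm_num),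
      ← Int.mul_emod]

-- the square-and-multiply loop invariant
theorem pvPowmodLoop_eq (k : Nat) : ∀ (e : Int), e.toNat = k → 0 ≤ e → ∀ (r b : Int),
    pvPowmodLoop (r % 10000000000) (b % 10000000000) e = r * b ^ e.toNat % 10000000000 := by
  induction k using Nat.strong_induction_on with
  | _ k ih =>
    intro e hk he r b
    have hmodT : ∀ a : Int, PySem.Int.mod a 10000000000 = a % 10000000000 :=
      fun a => PySem.Int.mod_eq_emod_of_pos (by norm_num)
    rw [pvPowmodLoop]
    by_cases hpos : 0 < e
    · rw [if_pos hpos, PySem.Int.mod_eq_emod_of_pos (by norm_num : (0:Int) < 2),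
        PySem.Int.floordiv_eq_ediv_of_pos (by norm_num)]
      simp only [hmodT]
      have hm : (e / 2).toNat < k := by omega
      by_cases hodd : e % 2 = 1
      · rw [if_pos hodd, ← Int.mul_emod, ← Int.mul_emod,
          ih _ hm (e / 2) rfl (by omega) (r * b) (b * b)]
        have ht : e.toNat = 2 * (e / 2).toNat + 1 := by omega
        rw [ht]
        congr 1
        rw [pow_succ, pow_mul, pow_two]
        ring
      · rw [if_neg hodd, ← Int.mul_emod,
          ih _ hm (e / 2) rfl (by omega) r (b * b)]
        have ht : e.toNat = 2 * (e / 2).toNat := by omega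
        rw [ht]
        congr 1
        rw [pow_mul, pow_two]
    · rw [if_neg hpos]
      have : e = 0 := by omega
      subst this
      simp

-- the two per-term computations agree for every n the outer loop visits
theorem pvTerm_eq (n : Int) (hn : 1 ≤ n) :
    (PySem.List.pyRange 0 n 1).foldl (fun p _ => PySem.Int.mod (p * n) 10000000000) 1
      = pvPowmodLoop 1 (PySem.Int.mod n 10000000000) n := by
  have hc : ((n.toNat : Int)) = n := Int.toNat_of_nonneg (by omega)
  have hA := pvLoopA_eq n.toNat n
  rw [hc] at hA
  have hB := pvPowmodLoop_eq n.toNat n rfl (by omega) 1 n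
  rw [PySem.Int.mod_eq_emod_of_pos (by norm_num : (0:Int) < 10000000000)]
  norm_num at hB
  rw [hA, hB]

-- ===== VERDICT (by name: the statement is the Claim_ definition above) =====
theorem self_powers_spec : Claim_equal_self_powers := by
  intro last _
  unfold Spec_self_powers self_powers self_powers_alt
  dsimp only
  congr 1
  apply PySem.List.foldl_congr_mem
  intro acc n hmem
  have hn : 1 ≤ n := (PySem.List.mem_pyRange_one.mp hmem).1
  rw [pvTerm_eq n hn]
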